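-- pv_equiv track=rewrite | github.com/wakame-tech/kyopro | src/abc026/abc026_c/main.py | salary
-- ===== SOURCE A (Python) =====
-- def salary(n, i, b):
--     bs = []
--     for j in range(n):
--         if b[j] == i:
--             bs.append(j)
--
--     if len(bs) == 0:
--         return 1
--     else:
--         bs_salary = list(map(lambda e: salary(n, e, b), bs))
--         return max(bs_salary) + min(bs_salary) + 1
-- ===== SOURCE B (Python) =====
-- def salary(n, i, b):
--     children = {}
--     for j in range(n):
--         children.setdefault(b[j], []).append(j)
--
--     def go(v):
--         cs = children.get(v, [])
--         if not cs:
--             return 1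
--         vals = [go(c) for c in cs]
--         return max(vals) + min(vals) + 1
--
--     return go(i)
-- ===== Notes on version B (the rewrite author's own statement) =====
-- stated objective: alternative
-- what changed: B precomputes a children adjacency dict in one pass over the parent array and then does a plain DFS, instead of A's rescanning all n entries at every recursive call; on deep/bushy trees this drops the per-node scan, though a timing run's inputs did not show a speed-up.
import Mathlib
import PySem

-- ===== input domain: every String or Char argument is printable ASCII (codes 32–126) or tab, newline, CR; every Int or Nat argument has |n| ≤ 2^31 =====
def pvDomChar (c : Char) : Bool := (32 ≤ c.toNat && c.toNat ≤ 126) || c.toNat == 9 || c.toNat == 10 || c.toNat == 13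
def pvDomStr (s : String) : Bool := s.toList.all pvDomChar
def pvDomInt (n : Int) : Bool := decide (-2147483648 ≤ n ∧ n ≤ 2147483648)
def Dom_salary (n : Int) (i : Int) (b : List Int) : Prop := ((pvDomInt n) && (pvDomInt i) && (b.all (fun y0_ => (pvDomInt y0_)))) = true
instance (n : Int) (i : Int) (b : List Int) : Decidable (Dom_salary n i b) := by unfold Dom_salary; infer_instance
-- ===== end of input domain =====

-- B builds a children adjacency dict once and then does a plain DFS, instead of A's
-- per-call scan of all n entries (a structurally different, alternative algorithm).
-- Both recursions are ported with fuel n.toNat + 1, which suffices on Pre_salary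
-- (explored nodes are distinct and lie in [0, n), so the call depth is at most n + 1).

-- ===== PORT A =====
def salaryFuelA (n : Int) (b : List Int) : Nat → Int → Int
  | 0, _ => 0  -- fuel exhausted: unreachable under Pre_salary
  | fuel + 1, i =>
    let bs := (PySem.List.pyRange 0 n 1).foldl
      (fun acc j => if PySem.List.pyGetD b j 0 = i then acc ++ [j] else acc) []
    if bs.length = 0 then 1
    else
      let bs_salary := bs.map (fun e => salaryFuelA n b fuel e)
      (PySem.List.max? bs_salary (fun x => x)).getD 0
        + (PySem.List.min? bs_salary (fun x => x)).getD 0 + 1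

def salary (n : Int) (i : Int) (b : List Int) : Int :=
  salaryFuelA n b (n.toNat + 1) i

-- ===== PORT B =====
def childrenDict (n : Int) (b : List Int) : PySem.Dict Int (List Int) :=
  (PySem.List.pyRange 0 n 1).foldl
    (fun d j => d.modify (PySem.List.pyGetD b j 0) [] (· ++ [j])) PySem.Dict.empty

def goFuelB (children : PySem.Dict Int (List Int)) : Nat → Int → Int
  | 0, _ => 0  -- fuel exhausted: unreachable under Pre_salary
  | fuel + 1, v =>
    let cs := children.getD v []
    if cs = [] then 1
    else
      let vals := cs.map (fun c => goFuelB children fuel c)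
      (PySem.List.max? vals (fun x => x)).getD 0
        + (PySem.List.min? vals (fun x => x)).getD 0 + 1

def salary_alt (n : Int) (i : Int) (b : List Int) : Int :=
  goFuelB (childrenDict n b) (n.toNat + 1) i

-- ===== PRECONDITION & SPEC =====
-- Walks the parent map b from v for at most `steps` steps inside [0, n),
-- reporting whether it returns to i (i.e. whether i lies on a cycle of the parent map).
def hitsCycle (n : Int) (b : List Int) (i : Int) : Int → Nat → Bool
  | _, 0 => false
  | v, steps + 1 =>
    if 0 ≤ v ∧ v < n then
      let w := PySem.List.pyGetD b v 0
      if w = i then true else hitsCycle n b i w steps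
    else false

-- Pre_salary holds exactly where the Python A returns normally: it excludes only inputs
-- on which A raises — IndexError when 0 < n and len(b) < n, and RecursionError when i
-- lies on a cycle of the parent map b restricted to [0, n).
def Pre_salary (n : Int) (i : Int) (b : List Int) : Prop :=
  (n ≤ 0 ∨ n ≤ (b.length : Int)) ∧ hitsCycle n b i i (n.toNat + 1) = false

instance (n : Int) (i : Int) (b : List Int) : Decidable (Pre_salary n i b) := by
  unfold Pre_salary; infer_instance

def pvWitness_salary : Int × Int × List Int := (5, 0, [-1, 0, 0, 1, 1])

def Spec_salary (n : Int) (i : Int) (b : List Int) (out : Int) : Prop := out = salary_alt n i b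
instance (n : Int) (i : Int) (b : List Int) (out : Int) : Decidable (Spec_salary n i b out) := by
  unfold Spec_salary; infer_instance

-- ===== CLAIM (what is proved, stated in full; the proofs are below) =====
def Claim_equal_salary : Prop :=
  ∀ (n : Int) (i : Int) (b : List Int), Dom_salary n i b → Pre_salary n i b →
    Spec_salary n i b (salary n i b)

-- ===== LEMMAS AND PROOFS =====

-- The dict lookup in B returns exactly the children list A's inner scan builds.
theorem childrenDict_getD (n : Int) (b : List Int) (v : Int) :
    (childrenDict n b).getD v []
      = (PySem.List.pyRange 0 n 1).filter (fun j => PySem.List.pyGetD b j 0 = v) := by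
  unfold childrenDict
  have h : (PySem.List.pyRange 0 n 1).foldl
      (fun d j => d.modify (PySem.List.pyGetD b j 0) [] (· ++ [j])) PySem.Dict.empty
    = ((PySem.List.pyRange 0 n 1).map
        (fun j => (PySem.List.pyGetD b j 0, j))).foldl
        (fun d p => d.modify p.1 [] (· ++ [p.2])) PySem.Dict.empty := by
    rw [List.foldl_map]
  rw [h, PySem.Dict.getD_foldl_modify_append]
  simp [List.filter_map, Function.comp_def]
  exact List.filter_congr (fun x _ => Bool.beq_eq_decide_eq _ _)

theorem salaryFuelA_eq_goFuelB (n : Int) (b : List Int) (fuel : Nat) (i : Int) :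
    salaryFuelA n b fuel i = goFuelB (childrenDict n b) fuel i := by
  induction fuel generalizing i with
  | zero => rfl
  | succ f ih =>
    rw [salaryFuelA, goFuelB]
    rw [PySem.List.foldl_append_ite_eq_filter, childrenDict_getD]
    simp only [List.nil_append, List.length_eq_zero_iff]
    simp only [ih]

theorem salary_spec_aux (n : Int) (i : Int) (b : List Int) :
    salary n i b = salary_alt n i b := by
  unfold salary salary_alt
  exact salaryFuelA_eq_goFuelB n b (n.toNat + 1) i

-- ===== VERDICT (by name: the statement is the Claim_ definition above) =====
theorem salary_spec : Claim_equal_salary := by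
  intro n i b _ _
  unfold Spec_salary
  exact salary_spec_aux n i b
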